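-- pv_equiv track=rewrite | github.com/nyu-systems/gauntlet | src/generate_p4_test.py | convert_to_stf
-- ===== SOURCE A (Python) =====
-- def convert_to_stf(input_values):
--     stf_lst = []
--     for val in input_values:
--         if isinstance(val, str):
--             stf_lst.extend(list(val))
--         else:
--             raise RuntimeError(f"Type {type(val)} not supported!")
--     return stf_lst
-- ===== SOURCE B (Python) =====
-- def convert_to_stf(input_values):
--     # Pass 1: validate and count total characters.
--     total = 0
--     for val in input_values:
--         if isinstance(val, str):
--             total += len(val)
--         else:
--             raise RuntimeError(f"Type {type(val)} not supported!")
--     # Pass 2: preallocate the output and fill it by index.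
--     stf_lst = [None] * total
--     pos = 0
--     for val in input_values:
--         for ch in val:
--             stf_lst[pos] = ch
--             pos += 1
--     return stf_lst
-- ===== Notes on version B (the rewrite author's own statement) =====
-- stated objective: alternative
-- what changed: Replaces A's grow-by-extend accumulation with a count-then-preallocate scheme: a first pass validates and sums the lengths, a preallocated fixed-size list is then filled character-by-character via an index cursor.
import Mathlib
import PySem

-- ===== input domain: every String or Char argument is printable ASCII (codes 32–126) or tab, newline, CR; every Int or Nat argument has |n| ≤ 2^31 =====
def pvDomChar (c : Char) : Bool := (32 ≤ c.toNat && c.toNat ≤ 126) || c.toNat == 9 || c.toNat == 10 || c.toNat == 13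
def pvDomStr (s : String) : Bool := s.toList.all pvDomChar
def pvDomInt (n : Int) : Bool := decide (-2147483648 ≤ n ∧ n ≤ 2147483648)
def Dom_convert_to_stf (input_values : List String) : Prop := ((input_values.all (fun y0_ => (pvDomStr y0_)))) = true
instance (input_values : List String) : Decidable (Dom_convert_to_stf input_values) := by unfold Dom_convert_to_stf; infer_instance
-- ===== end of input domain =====

-- B replaces A's grow-by-extend accumulation with a count/validate pass, a preallocated
-- fixed-size list, and an index-cursor fill pass; same result, same asymptotic cost.

-- ===== PORT A =====
-- stf_lst accumulator; list(val) = the 1-char strings of val; isinstance(val, str) is always true for List String inputs.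
def convert_to_stf (input_values : List String) : List String :=
  input_values.foldl (fun stf_lst val => stf_lst ++ (val.toList.map (fun c => String.mk [c]))) []

-- ===== PORT B =====
-- pass 1: total = sum of lengths (validation is a no-op on List String);
-- pass 2: out = [None]*total modelled as replicate total "" (every slot is overwritten),
-- out[pos] = ch via List.set with a Nat cursor (pos is provably nonnegative and in range).
def convert_to_stf_alt (input_values : List String) : List String :=
  let total := input_values.foldl (fun t val => t + val.toList.length) 0
  (input_values.foldl
    (fun st val => val.toList.foldl
      (fun (st : List String × Nat) ch => (st.1.set st.2 (String.mk [ch]), st.2 + 1)) st)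
    (List.replicate total "", 0)).1

-- ===== PRECONDITION & SPEC =====
def Spec_convert_to_stf (input_values : List String) (out : List String) : Prop := out = convert_to_stf_alt input_values
instance (input_values : List String) (out : List String) : Decidable (Spec_convert_to_stf input_values out) := by unfold Spec_convert_to_stf; infer_instance

-- ===== CLAIM (what is proved, stated in full; the proofs are below) =====
def Claim_equal_convert_to_stf : Prop := ∀ (input_values : List String), Dom_convert_to_stf input_values → Spec_convert_to_stf input_values (convert_to_stf input_values)

-- ===== LEMMAS AND PROOFS =====
theorem a_foldl_ext (xs : List String) (acc : List String) :
    xs.foldl (fun stf_lst val => stf_lst ++ (val.toList.map (fun c => String.mk [c]))) acc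
      = acc ++ (xs.flatMap String.toList).map (fun c => String.mk [c]) := by
  induction xs generalizing acc with
  | nil => simp
  | cons h t ih => simp [ih, List.map_append]

theorem set_append_len (pre : List String) (s : String) (suf : List String) (x : String) :
    (pre ++ s :: suf).set pre.length x = pre ++ x :: suf := by
  induction pre with
  | nil => simp
  | cons h t ih => simp [List.set, ih]

-- filling a segment of exactly the right length writes cs into place, leaving the rest alone
theorem inner_fill (cs : List Char) (pre cur rest : List String) (h : cur.length = cs.length) :
    cs.foldl (fun (st : List String × Nat) ch => (st.1.set st.2 (String.mk [ch]), st.2 + 1))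
      (pre ++ cur ++ rest, pre.length)
      = (pre ++ cs.map (fun c => String.mk [c]) ++ rest,
         (pre ++ cs.map (fun c => String.mk [c])).length) := by
  induction cs generalizing pre cur with
  | nil =>
    have : cur = [] := List.eq_nil_of_length_eq_zero h
    simp [this]
  | cons c cs ih =>
    cases cur with
    | nil => simp at h
    | cons s cur =>
      have hset : ((pre ++ s :: cur ++ rest)).set pre.length (String.mk [c])
          = pre ++ String.mk [c] :: (cur ++ rest) := by
        simpa using set_append_len pre s (cur ++ rest) (String.mk [c])
      have h' : cur.length = cs.length := by simpa using h
      have := ih (pre ++ [String.mk [c]]) cur h'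
      simp only [List.foldl_cons, List.append_assoc, List.cons_append, List.nil_append] at hset this ⊢
      rw [hset]
      simpa [List.append_assoc] using this

theorem outer_fill (xs : List String) (pre suf : List String)
    (h : suf.length = (xs.flatMap String.toList).length) :
    xs.foldl
      (fun st val => val.toList.foldl
        (fun (st : List String × Nat) ch => (st.1.set st.2 (String.mk [ch]), st.2 + 1)) st)
      (pre ++ suf, pre.length)
      = (pre ++ (xs.flatMap String.toList).map (fun c => String.mk [c]),
         (pre ++ (xs.flatMap String.toList).map (fun c => String.mk [c])).length) := by
  induction xs generalizing pre suf with
  | nil =>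
    have : suf = [] := List.eq_nil_of_length_eq_zero (by simpa using h)
    simp [this]
  | cons v xs ih =>
    have hlen : v.toList.length ≤ suf.length := by
      simp [h, List.flatMap_cons]
    have htake : (suf.take v.toList.length).length = v.toList.length :=
      List.length_take_of_le hlen
    have hsplit : suf = suf.take v.toList.length ++ suf.drop v.toList.length :=
      (List.take_append_drop _ _).symm
    have hdrop : (suf.drop v.toList.length).length = (xs.flatMap String.toList).length := by
      simp [h, List.flatMap_cons]
    simp only [List.foldl_cons]
    rw [hsplit, ← List.append_assoc]
    rw [inner_fill v.toList pre (suf.take v.toList.length) (suf.drop v.toList.length) htake]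
    have := ih (pre ++ v.toList.map (fun c => String.mk [c])) (suf.drop v.toList.length) hdrop
    simpa [List.flatMap_cons, List.map_append, List.append_assoc] using this

theorem b_total (xs : List String) (t : Nat) :
    xs.foldl (fun t val => t + val.toList.length) t
      = t + (xs.flatMap String.toList).length := by
  induction xs generalizing t with
  | nil => simp
  | cons h tl ih =>
    rw [List.foldl_cons, ih]
    simp [List.flatMap_cons]
    omega

-- ===== VERDICT (by name: the statement is the Claim_ definition above) =====
theorem convert_to_stf_spec : Claim_equal_convert_to_stf := by
  intro xs _
  show _ = _
  rw [convert_to_stf, convert_to_stf_alt, a_foldl_ext, List.nil_append]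
  simp only [b_total, Nat.zero_add]
  have := outer_fill xs [] (List.replicate (xs.flatMap String.toList).length "")
    (by simp)
  simpa using (congrArg Prod.fst this).symm
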